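-- pv_equiv track=rewrite | github.com/Almiradyaa/DSA-Queue-Group-5 | ai_solution.py | stone_pile_game
-- ===== SOURCE A (Python) =====
-- from collections import deque
--
-- def stone_pile_game(test_cases):
--     results = []
--     for N, A in test_cases:
--         dq = deque(A)
--
--         if len(dq) == 1:
--             results.append((1, dq[0]))
--             continue
--
--         turn = 1
--
--         while len(dq) > 1:
--             if turn == 1:
--                 dq.append(dq.popleft())
--                 if len(dq) > 1:
--                     dq.popleft()
--             else:
--                 dq.append(dq.popleft())
--                 dq.append(dq.popleft())
--                 if len(dq) > 1:
--                     dq.popleft()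
--
--             turn = 1 - turn
--
--         last_player = 1 - turn
--
--         results.append((last_player, dq[0]))
--
--     return results
-- ===== SOURCE B (Python) =====
-- def stone_pile_game(test_cases):
--     results = []
--     for N, A in test_cases:
--         stones = list(A)
--         if len(stones) == 1:
--             results.append((1, stones[0]))
--             continue
--         p = 0
--         turn = 1
--         while len(stones) > 1:
--             p = (p + (1 if turn == 1 else 2)) % len(stones)
--             del stones[p]
--             if p == len(stones):
--                 p = 0
--             turn = 1 - turn
--         results.append((1 - turn, stones[p]))
--     return results
-- ===== Notes on version B (the rewrite author's own statement) =====
-- stated objective: alternative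
-- what changed: B replaces the deque-rotation simulation (append(popleft) cycling) by a plain list with an integer pointer advanced modulo the current length, deleting one element per move in place.
import Mathlib
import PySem

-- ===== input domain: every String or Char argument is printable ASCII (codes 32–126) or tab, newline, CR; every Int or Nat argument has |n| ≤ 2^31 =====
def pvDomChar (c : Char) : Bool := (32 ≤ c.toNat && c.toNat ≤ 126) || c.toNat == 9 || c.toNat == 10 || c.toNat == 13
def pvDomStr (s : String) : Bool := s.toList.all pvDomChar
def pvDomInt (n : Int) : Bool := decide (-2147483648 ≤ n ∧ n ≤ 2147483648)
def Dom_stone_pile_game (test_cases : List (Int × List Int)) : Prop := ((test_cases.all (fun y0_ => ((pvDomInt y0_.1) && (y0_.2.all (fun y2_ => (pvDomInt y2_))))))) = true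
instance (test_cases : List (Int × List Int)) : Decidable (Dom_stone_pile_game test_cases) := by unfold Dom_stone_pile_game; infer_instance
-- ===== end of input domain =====

-- B: list + modular pointer instead of deque rotations (alternative decomposition, same results).
-- Both A and B raise IndexError when a test case has an empty stone list; Pre_ excludes those.


-- ===== PORT A =====
-- dq.append(dq.popleft()): only reached with dq nonempty (loop guard), so headI is exact there
def pvRotA (dq : List Int) : List Int := dq.tail ++ [dq.headI]

-- the while loop of A; dq[0] at the end ported as headI (exact: under Pre_ the deque is nonempty)
def pvLoopA (dq : List Int) (turn : Int) : Int × Int :=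
  if h : dq.length > 1 then
    let dq2 :=
      if turn == 1 then
        let d := pvRotA dq
        if d.length > 1 then d.tail else d
      else
        let d := pvRotA (pvRotA dq)
        if d.length > 1 then d.tail else d
    pvLoopA dq2 (1 - turn)
  else (1 - turn, dq.headI)
termination_by dq.length
decreasing_by
  all_goals
    simp only [pvRotA]
    split <;> simp_all [List.length_tail, List.length_append] <;> omega

def stone_pile_game (test_cases : List (Int × List Int)) : List (Int × Int) :=
  test_cases.foldl (fun results nA =>
    let A := nA.2
    if A.length == 1 then results ++ [((1 : Int), A.headI)]
    else results ++ [pvLoopA A 1]) []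

-- ===== PORT B =====
-- the while loop of B: pointer p into stones; stones[p] at the end ported as getD (exact under Pre_)
def pvLoopB (stones : List Int) (p : Nat) (turn : Int) : Int × Int :=
  if h : stones.length > 1 then
    let p1 := (p + (if turn == 1 then 1 else 2)) % stones.length
    let stones2 := stones.eraseIdx p1
    let p2 := if p1 == stones2.length then 0 else p1
    pvLoopB stones2 p2 (1 - turn)
  else (1 - turn, stones.getD p 0)
termination_by stones.length
decreasing_by
  have m1 : (p + 1) % stones.length < stones.length := Nat.mod_lt _ (by omega)
  have m2 : (p + 2) % stones.length < stones.length := Nat.mod_lt _ (by omega)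
  simp only [List.length_eraseIdx]
  split <;> omega

def stone_pile_game_alt (test_cases : List (Int × List Int)) : List (Int × Int) :=
  test_cases.foldl (fun results nA =>
    let A := nA.2
    if A.length == 1 then results ++ [((1 : Int), A.headI)]
    else results ++ [pvLoopB A 0 1]) []

-- ===== PRECONDITION & SPEC =====
-- Pre_ excludes test cases with an empty stone list: there Python A (and B) raise IndexError on dq[0].
def Pre_stone_pile_game (test_cases : List (Int × List Int)) : Prop :=
  ∀ c ∈ test_cases, c.2 ≠ []
instance (test_cases : List (Int × List Int)) : Decidable (Pre_stone_pile_game test_cases) := by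
  unfold Pre_stone_pile_game; infer_instance

def pvWitness_stone_pile_game : (List (Int × List Int)) := [(3, [1, 2, 3]), (1, [7])]

def Spec_stone_pile_game (test_cases : List (Int × List Int)) (out : List (Int × Int)) : Prop := out = stone_pile_game_alt test_cases
instance (test_cases : List (Int × List Int)) (out : List (Int × Int)) : Decidable (Spec_stone_pile_game test_cases out) := by unfold Spec_stone_pile_game; infer_instance

-- ===== CLAIM (what is proved, stated in full; the proofs are below) =====
def Claim_equal_stone_pile_game : Prop := ∀ (test_cases : List (Int × List Int)), Dom_stone_pile_game test_cases → Pre_stone_pile_game test_cases → Spec_stone_pile_game test_cases (stone_pile_game test_cases)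

-- ===== LEMMAS AND PROOFS =====

-- one deque rotation is List.rotate 1
lemma pvRotA_eq_rotate (l : List Int) (h : l ≠ []) : pvRotA l = l.rotate 1 := by
  cases l with
  | nil => exact absurd rfl h
  | cons a t => simp [pvRotA, List.rotate_cons_succ]

-- popleft after rotating by q removes stones[q % n] and leaves the rotation at q % n
lemma tail_rotate_eq (xs : List Int) (q : Nat) (h : 0 < xs.length) :
    (xs.rotate q).tail = (xs.eraseIdx (q % xs.length)).rotate (q % xs.length) := by
  have hr : q % xs.length < xs.length := Nat.mod_lt _ h
  rw [← List.rotate_mod]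
  rw [List.rotate_eq_drop_append_take (le_of_lt hr)]
  rw [List.rotate_eq_drop_append_take
      (by simp [List.length_eraseIdx, hr]; omega)]
  rw [List.eraseIdx_eq_take_drop_succ]
  have hlen : (xs.take (q % xs.length)).length = q % xs.length := by
    simp [List.length_take]; omega
  rw [List.drop_left' hlen, List.take_left' hlen]
  cases hd : xs.drop (q % xs.length) with
  | nil =>
      exfalso
      have := List.length_drop (l := xs) (i := q % xs.length)
      rw [hd] at this; simp at this; omega
  | cons a t =>
      have ht : xs.drop (q % xs.length + 1) = t := by
        have h2 : (xs.drop (q % xs.length)).tail = xs.drop (q % xs.length + 1) :=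
          List.tail_drop
        rw [hd] at h2; simpa using h2.symm
      simp [ht]

-- rotating by the full length is the identity (B's pointer wrap)
lemma rot_norm (L : List Int) (q : Nat) :
    L.rotate q = L.rotate (if q == L.length then 0 else q) := by
  by_cases he : q = L.length
  · rw [if_pos (beq_iff_eq.mpr he), he, List.rotate_length, List.rotate_zero]
  · rw [if_neg (by simpa using he)]

-- main invariant: A's deque is B's list rotated by B's pointer
lemma loop_eq (n : Nat) : ∀ (stones : List Int) (p : Nat) (turn : Int),
    stones.length = n → (p < stones.length ∨ p = 0) →
    pvLoopA (stones.rotate p) turn = pvLoopB stones p turn := by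
  induction n using Nat.strong_induction_on with
  | _ n ih =>
    intro stones p turn hn hp
    by_cases hbig : stones.length > 1
    · -- both loops take a step
      have hne : stones ≠ [] := by intro hc; subst hc; simp at hbig
      have hrl : (stones.rotate p).length = stones.length := List.length_rotate ..
      rw [pvLoopA.eq_def, pvLoopB.eq_def]
      rw [dif_pos (by omega : (stones.rotate p).length > 1), dif_pos hbig]
      set s : Nat := if turn == 1 then 1 else 2 with hs
      have h1 : pvRotA (stones.rotate p) = stones.rotate (p + 1) := by
        rw [pvRotA_eq_rotate _ (by simp [hne]), List.rotate_rotate]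
      have h2 : pvRotA (pvRotA (stones.rotate p)) = stones.rotate (p + 2) := by
        rw [h1, pvRotA_eq_rotate _ (by simp [hne]), List.rotate_rotate]
      have hstep : (if turn == 1 then
            let d := pvRotA (stones.rotate p)
            if d.length > 1 then d.tail else d
          else
            let d := pvRotA (pvRotA (stones.rotate p))
            if d.length > 1 then d.tail else d)
          = (stones.rotate (p + s)).tail := by
        by_cases ht : turn == 1
        · have hs1 : s = 1 := by simp [hs, ht]
          rw [if_pos ht, hs1]
          simp only [h1, List.length_rotate]
          rw [if_pos hbig]
        · have hs2 : s = 2 := by simp [hs, ht]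
          rw [if_neg ht, hs2]
          simp only [h2, List.length_rotate]
          rw [if_pos hbig]
      have hq : (stones.rotate (p + s)).tail
          = (stones.eraseIdx ((p + s) % stones.length)).rotate ((p + s) % stones.length) :=
        tail_rotate_eq stones (p + s) (by omega)
      set p1 : Nat := (p + s) % stones.length with hp1
      have hp1lt : p1 < stones.length := Nat.mod_lt _ (by omega)
      have hel : (stones.eraseIdx p1).length = stones.length - 1 := by
        simp [List.length_eraseIdx, hp1lt]
      have hrot2 : (stones.eraseIdx p1).rotate p1
          = (stones.eraseIdx p1).rotate (if p1 == (stones.eraseIdx p1).length then 0 else p1) :=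
        rot_norm (stones.eraseIdx p1) p1
      have hrec := ih (stones.length - 1) (by omega) (stones.eraseIdx p1)
        (if p1 == (stones.eraseIdx p1).length then 0 else p1) (1 - turn)
        hel
        (by
          by_cases he : p1 = (stones.eraseIdx p1).length
          · rw [if_pos (beq_iff_eq.mpr he)]; right; rfl
          · rw [if_neg (by simpa using he)]; left; omega)
      simp only [hstep, hq, hrot2]
      exact hrec
    · -- terminal case: length 0 or 1
      rw [pvLoopA.eq_def, pvLoopB.eq_def]
      have hrl : (stones.rotate p).length = stones.length := List.length_rotate ..
      rw [dif_neg (by omega : ¬ (stones.rotate p).length > 1), dif_neg hbig]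
      rcases (by omega : stones.length = 0 ∨ stones.length = 1) with h0 | h1
      · have : stones = [] := List.length_eq_zero_iff.mp h0
        subst this; simp
      · obtain ⟨a, rfl⟩ := List.length_eq_one_iff.mp h1
        have hp0 : p = 0 := by
          have : p < 1 ∨ p = 0 := by simpa using hp
          omega
        subst hp0; simp

lemma loop_top (A : List Int) : pvLoopA A 1 = pvLoopB A 0 1 := by
  have := loop_eq A.length A 0 1 rfl (by right; rfl)
  simpa using this

theorem pvFold_eq (test_cases : List (Int × List Int))
    (hpre : Pre_stone_pile_game test_cases) (acc : List (Int × Int)) :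
    test_cases.foldl (fun results nA =>
      let A := nA.2
      if A.length == 1 then results ++ [((1 : Int), A.headI)]
      else results ++ [pvLoopA A 1]) acc
    = test_cases.foldl (fun results nA =>
      let A := nA.2
      if A.length == 1 then results ++ [((1 : Int), A.headI)]
      else results ++ [pvLoopB A 0 1]) acc := by
  induction test_cases generalizing acc with
  | nil => rfl
  | cons c rest ihr =>
      have hrest : Pre_stone_pile_game rest := fun x hx => hpre x (by simp [hx])
      simp only [List.foldl_cons]
      rw [loop_top c.2]
      exact ihr hrest _

-- ===== VERDICT (by name: the statement is the Claim_ definition above) =====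
theorem stone_pile_game_spec : Claim_equal_stone_pile_game := by
  intro test_cases _ hpre
  unfold Spec_stone_pile_game stone_pile_game stone_pile_game_alt
  exact pvFold_eq test_cases hpre []
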